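-- pv_equiv track=rewrite | github.com/tataratone/tiny_math_and_physics_problem_solver | search_p-repd/search_p-repd.py | repunits_for_base
-- ===== SOURCE A (Python) =====
-- def repunits_for_base(p, d_min, d_max):
--     """
--     R_p(d) = (p^d - 1)/(p-1) を d_min..d_max の範囲で前計算
--
--     Parameters
--     ----------
--     p : int
--         基数（2以上の整数）
--     d_min : int
--         計算を開始する桁数（2以上）
--     d_max : int
--         計算を終了する桁数
--
--     Returns
--     -------
--     list of tuple
--         (d, R_p(d)) のタプルのリスト
--     """
--     arr = []
--     R = 1  # d=1
--     for d in range(2, d_max + 1):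
--         R = p * R + 1
--         if d >= d_min:
--             arr.append((d, R))
--     return arr
-- ===== SOURCE B (Python) =====
-- def repunits_for_base(p, d_min, d_max):
--     """Same result as A: list of (d, R_p(d)) for d in max(d_min,2)..d_max.
--
--     Instead of iterating the recurrence from d=2, jump straight to
--     d = max(d_min, 2) with fast exponentiation via the closed form
--     R_p(d) = (p**d - 1) // (p - 1) (exact division; R_1(d) = d),
--     then extend by the recurrence only over the reported range.
--     """
--     lo = max(d_min, 2)
--     if lo > d_max:
--         return []
--     if p == 1:
--         return [(d, d) for d in range(lo, d_max + 1)]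
--     R = (p ** lo - 1) // (p - 1)
--     arr = [(lo, R)]
--     for d in range(lo + 1, d_max + 1):
--         R = p * R + 1
--         arr.append((d, R))
--     return arr
-- ===== Notes on version B (the rewrite author's own statement) =====
-- stated objective: faster
-- what changed: B skips the warm-up loop from d=2: it jumps directly to d=max(d_min,2) using the closed form (p**d-1)//(p-1) with fast exponentiation (R_1(d)=d for p=1), then iterates the recurrence only over the reported d_min..d_max window.
import Mathlib
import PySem

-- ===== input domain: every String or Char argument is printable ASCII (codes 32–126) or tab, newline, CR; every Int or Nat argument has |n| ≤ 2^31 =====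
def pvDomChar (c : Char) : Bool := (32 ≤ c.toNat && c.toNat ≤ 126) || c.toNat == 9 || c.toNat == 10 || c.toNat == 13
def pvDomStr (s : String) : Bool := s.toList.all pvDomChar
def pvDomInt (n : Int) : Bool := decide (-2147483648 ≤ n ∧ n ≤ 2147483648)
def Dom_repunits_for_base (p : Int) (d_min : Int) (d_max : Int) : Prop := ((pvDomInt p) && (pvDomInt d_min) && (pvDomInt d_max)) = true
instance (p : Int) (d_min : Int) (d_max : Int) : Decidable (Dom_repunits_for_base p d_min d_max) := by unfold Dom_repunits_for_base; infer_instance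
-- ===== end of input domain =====

-- B replaces A's warm-up recurrence from d=2 by a closed-form jump (p^lo-1)//(p-1) to lo = max(d_min,2),
-- then iterates only over the reported window (objective: faster; asymptotic when d_min is large).

-- ===== PORT A =====
def repunits_for_base (p : Int) (d_min : Int) (d_max : Int) : List (Int × Int) :=
  ((PySem.List.pyRange 2 (d_max + 1) 1).foldl
    (fun (s : List (Int × Int) × Int) d =>
      let R := p * s.2 + 1
      (if d ≥ d_min then s.1 ++ [(d, R)] else s.1, R))
    ([], 1)).1

-- ===== PORT B =====
def repunits_for_base_alt (p : Int) (d_min : Int) (d_max : Int) : List (Int × Int) :=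
  let lo := max d_min 2
  if lo > d_max then []
  else if p = 1 then (PySem.List.pyRange lo (d_max + 1) 1).map (fun d => (d, d))
  else
    -- p ** lo : lo ≥ 2 ≥ 0, so 'p ^ lo.toNat' is exactly Python's integer power here
    let R0 := PySem.Int.floordiv (p ^ lo.toNat - 1) (p - 1)
    ((PySem.List.pyRange (lo + 1) (d_max + 1) 1).foldl
      (fun (s : List (Int × Int) × Int) d =>
        let R := p * s.2 + 1
        (s.1 ++ [(d, R)], R))
      ([(lo, R0)], R0)).1

-- ===== PRECONDITION & SPEC =====
def Spec_repunits_for_base (p : Int) (d_min : Int) (d_max : Int) (out : List (Int × Int)) : Prop := out = repunits_for_base_alt p d_min d_max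
instance (p : Int) (d_min : Int) (d_max : Int) (out : List (Int × Int)) : Decidable (Spec_repunits_for_base p d_min d_max out) := by unfold Spec_repunits_for_base; infer_instance

-- ===== CLAIM (what is proved, stated in full; the proofs are below) =====
def Claim_equal_repunits_for_base : Prop := ∀ (p : Int) (d_min : Int) (d_max : Int), Dom_repunits_for_base p d_min d_max → Spec_repunits_for_base p d_min d_max (repunits_for_base p d_min d_max)

-- ===== LEMMAS AND PROOFS =====

-- the repunit sequence: rep p d = 1 + p + … + p^(d-1)
def rep (p : Int) : Nat → Int
  | 0 => 0
  | n + 1 => p * rep p n + 1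

theorem rep_mul (p : Int) (n : Nat) : rep p n * (p - 1) = p ^ n - 1 := by
  induction n with
  | zero => simp [rep]
  | succ n ih =>
    have h : rep p (n + 1) * (p - 1) = p * (rep p n * (p - 1)) + (p - 1) := by
      simp only [rep]; ring
    rw [h, ih, pow_succ]; ring

theorem rep_one (n : Nat) : rep 1 n = n := by
  induction n with
  | zero => simp [rep]
  | succ n ih => simp [rep, ih]

-- A's loop, characterised: folding over range k..k+n starting from (arr, rep p m), k = m+1
theorem loopA (p d_min : Int) (n : Nat) : ∀ (m : Nat) (k : Int), k = (m : Int) + 1 →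
    ∀ (arr : List (Int × Int)),
    (PySem.List.pyRange k (k + n) 1).foldl
      (fun (s : List (Int × Int) × Int) d =>
        let R := p * s.2 + 1
        (if d ≥ d_min then s.1 ++ [(d, R)] else s.1, R))
      (arr, rep p m)
    = (arr ++ (List.range n).filterMap
        (fun (i : Nat) => if d_min ≤ k + (i : Int) then some (k + (i : Int), rep p (m + 1 + i)) else none),
       rep p (m + n)) := by
  induction n with
  | zero =>
    intro m k hk arr
    rw [PySem.List.pyRange_one_eq_nil (by omega)]
    simp
  | succ n ih =>
    intro m k hk arr
    rw [PySem.List.pyRange_one_cons (by push_cast; omega)]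
    simp only [List.foldl_cons]
    have hR : p * rep p m + 1 = rep p (m + 1) := by simp [rep]
    simp only [hR]
    have hend : k + ((n + 1 : Nat) : Int) = (k + 1) + (n : Nat) := by push_cast; ring
    rw [hend, ih (m + 1) (k + 1) (by omega)]
    simp only [Prod.mk.injEq]
    refine ⟨?_, by congr 1; omega⟩
    rw [List.range_succ_eq_map, List.filterMap_cons, List.filterMap_map]
    have hcol : ∀ i ∈ List.range n,
        ((fun i : Nat => if d_min ≤ k + (i : Int) then some (k + (i : Int), rep p ((m + 1 + i : Nat))) else none) ∘ (fun i => i + 1)) i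
        = (fun i : Nat => if d_min ≤ (k + 1) + (i : Int) then some ((k + 1) + (i : Int), rep p (m + 1 + 1 + i)) else none) i := by
      intro i _
      simp only [Function.comp]
      have h1 : k + ((i + 1 : Nat) : Int) = (k + 1) + (i : Int) := by push_cast; ring
      have h2 : m + 1 + (i + 1) = m + 1 + 1 + i := by omega
      rw [h1, h2]
    rw [List.filterMap_congr hcol]
    by_cases h : d_min ≤ k
    · simp [ge_iff_le, h, List.append_assoc]
    · simp [ge_iff_le, h]

-- B's loop, characterised (no filter)
theorem loopB (p : Int) (n : Nat) : ∀ (m : Nat) (k : Int), k = (m : Int) + 1 →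
    ∀ (arr : List (Int × Int)),
    (PySem.List.pyRange k (k + n) 1).foldl
      (fun (s : List (Int × Int) × Int) d =>
        let R := p * s.2 + 1
        (s.1 ++ [(d, R)], R))
      (arr, rep p m)
    = (arr ++ (List.range n).map (fun (i : Nat) => (k + (i : Int), rep p (m + 1 + i))), rep p (m + n)) := by
  induction n with
  | zero =>
    intro m k hk arr
    rw [PySem.List.pyRange_one_eq_nil (by omega)]
    simp
  | succ n ih =>
    intro m k hk arr
    rw [PySem.List.pyRange_one_cons (by push_cast; omega)]
    simp only [List.foldl_cons]
    have hR : p * rep p m + 1 = rep p (m + 1) := by simp [rep]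
    simp only [hR]
    have hend : k + ((n + 1 : Nat) : Int) = (k + 1) + (n : Nat) := by push_cast; ring
    rw [hend, ih (m + 1) (k + 1) (by omega)]
    simp only [Prod.mk.injEq]
    refine ⟨?_, by congr 1; omega⟩
    rw [List.range_succ_eq_map, List.map_cons, List.map_map]
    simp only [Nat.cast_zero, add_zero, List.append_assoc, List.singleton_append]
    congr 1
    congr 1
    apply List.map_congr_left
    intro i _
    simp only [Function.comp, Nat.succ_eq_add_one, Prod.mk.injEq]
    refine ⟨by push_cast; ring, by congr 1; omega⟩

-- filterMap of a threshold condition over a range is a shifted map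
theorem filterMap_range_if {α : Type} (f : Nat → α) (c n : Nat) :
    (List.range n).filterMap (fun i => if c ≤ i then some (f i) else none)
    = (List.range (n - c)).map (fun j => f (c + j)) := by
  induction n with
  | zero => simp
  | succ n ih =>
    rw [List.range_succ, List.filterMap_append, ih]
    by_cases h : c ≤ n
    · have h1 : n + 1 - c = (n - c) + 1 := by omega
      rw [h1, List.range_succ, List.map_append]
      simp only [List.filterMap_cons, h, if_pos, List.filterMap_nil, List.map_cons, List.map_nil]
      congr 3
      omega
    · have h1 : n + 1 - c = n - c := by omega
      rw [h1]
      simp [h]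

theorem fdiv_rep (p : Int) (hp : p ≠ 1) (m : Nat) :
    PySem.Int.floordiv (p ^ m - 1) (p - 1) = rep p m := by
  rw [← rep_mul p m]
  simp only [PySem.Int.floordiv]
  exact Int.mul_fdiv_cancel _ (by omega)

-- A's result for d_max ≥ 2, as a map over a shifted range
theorem portA_eq (p d_min d_max : Int) (h2 : 2 ≤ d_max) :
    repunits_for_base p d_min d_max
    = (List.range ((d_max - 1).toNat - (d_min - 2).toNat)).map
        (fun j => ((2 : Int) + (((d_min - 2).toNat + j : Nat) : Int), rep p ((d_min - 2).toNat + j + 2))) := by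
  unfold repunits_for_base
  have key := loopA p d_min ((d_max - 1).toNat) 1 2 (by norm_num) []
  simp only [show rep p 1 = 1 from by simp [rep]] at key
  rw [show (2 : Int) + (((d_max - 1).toNat : Nat) : Int) = d_max + 1 from by omega] at key
  rw [key]
  simp only [List.nil_append]
  rw [List.filterMap_congr (g := fun i : Nat =>
        if (d_min - 2).toNat ≤ i then some ((2 : Int) + (i : Int), rep p (1 + 1 + i)) else none)
      (by intro i _
          have h1 : d_min ≤ 2 + (i : Int) ↔ (d_min - 2).toNat ≤ i := by omega
          simp only [h1])]
  rw [filterMap_range_if (fun i : Nat => ((2 : Int) + (i : Int), rep p (1 + 1 + i)))]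
  apply List.map_congr_left
  intro j _
  have hidx : 1 + 1 + ((d_min - 2).toNat + j) = (d_min - 2).toNat + j + 2 := by omega
  rw [hidx]

-- ===== VERDICT (by name: the statement is the Claim_ definition above) =====
theorem repunits_for_base_spec : Claim_equal_repunits_for_base := by
  intro p d_min d_max _
  unfold Spec_repunits_for_base repunits_for_base_alt
  set lo : Int := max d_min 2 with hlo
  have hlo2 : 2 ≤ lo := le_max_right _ _
  have hlod : d_min ≤ lo := le_max_left _ _
  by_cases hgt : lo > d_max
  · rw [if_pos hgt]
    by_cases h2 : 2 ≤ d_max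
    · rw [portA_eq p d_min d_max h2]
      have h0 : (d_max - 1).toNat - (d_min - 2).toNat = 0 := by omega
      rw [h0]; simp
    · unfold repunits_for_base
      rw [PySem.List.pyRange_one_eq_nil (by omega)]
      simp
  · rw [if_neg hgt]
    have hled : lo ≤ d_max := by omega
    have h2 : 2 ≤ d_max := le_trans hlo2 hled
    rw [portA_eq p d_min d_max h2]
    set c : Nat := (d_min - 2).toNat with hcdef
    have hc : (c : Int) = lo - 2 := by omega
    set N : Nat := (d_max - 1).toNat - c with hN
    have hNc : (N : Int) = d_max - lo + 1 := by omega
    have hN1 : 1 ≤ N := by omega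
    by_cases hp : p = 1
    · rw [if_pos hp]
      rw [PySem.List.pyRange_one]
      have hlen : (d_max + 1 - lo).toNat = N := by omega
      rw [hlen, List.map_map]
      apply List.map_congr_left
      intro j _
      simp only [Function.comp, hp, rep_one, Prod.mk.injEq]
      constructor <;> push_cast <;> omega
    · rw [if_neg hp]
      have hR0 : PySem.Int.floordiv (p ^ lo.toNat - 1) (p - 1) = rep p lo.toNat :=
        fdiv_rep p hp lo.toNat
      simp only [hR0]
      have hmk : lo + 1 = ((lo.toNat - 1 + 1 : Nat) : Int) + 1 := by omega
      have key := loopB p (N - 1) (lo.toNat - 1 + 1) (lo + 1) (by omega) [(lo, rep p lo.toNat)]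
      rw [show lo + 1 + (((N - 1 : Nat)) : Int) = d_max + 1 from by omega] at key
      rw [show lo.toNat - 1 + 1 = lo.toNat from by omega] at key
      rw [key]
      simp only [List.singleton_append]
      rw [show N = (N - 1) + 1 from by omega, List.range_succ_eq_map, List.map_cons, List.map_map]
      congr 1
      · simp only [Prod.mk.injEq]
        refine ⟨by push_cast; omega, by congr 1; omega⟩
      · apply List.map_congr_left
        intro i _
        simp only [Function.comp, Prod.mk.injEq]
        refine ⟨by push_cast; omega, by congr 1; omega⟩
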